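-- pv_equiv track=rewrite | github.com/JonStratton/xor-block | xor_block.py | outputVb
-- ===== SOURCE A (Python) =====
-- def outputVb(outList):
--    lines = []
--    i = 0
--    for item in outList:
--       linesI = int(i / 40)
--       if linesI < len(lines):
--          lines[linesI] = lines[linesI] + ',' + str(item)
--       else:
--          lines.append(str(item))
--       i = i + 1
--    outText = 'buf = Array(' + " _\n".join(lines) + ')'
--    return outText
-- ===== SOURCE B (Python) =====
-- def outputVb(outList):
--    lines = [','.join(str(x) for x in outList[i:i+40]) for i in range(0, len(outList), 40)]
--    return 'buf = Array(' + ' _\n'.join(lines) + ')'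
-- ===== Notes on version B (the rewrite author's own statement) =====
-- stated objective: faster
-- what changed: Replaces A's per-item loop with i/40 index arithmetic and repeated per-line string concatenation by a chunk-first pass: for each i in range(0, len, 40) take the slice outList[i:i+40] and join it once with ','.join, then join the lines.
import Mathlib
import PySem

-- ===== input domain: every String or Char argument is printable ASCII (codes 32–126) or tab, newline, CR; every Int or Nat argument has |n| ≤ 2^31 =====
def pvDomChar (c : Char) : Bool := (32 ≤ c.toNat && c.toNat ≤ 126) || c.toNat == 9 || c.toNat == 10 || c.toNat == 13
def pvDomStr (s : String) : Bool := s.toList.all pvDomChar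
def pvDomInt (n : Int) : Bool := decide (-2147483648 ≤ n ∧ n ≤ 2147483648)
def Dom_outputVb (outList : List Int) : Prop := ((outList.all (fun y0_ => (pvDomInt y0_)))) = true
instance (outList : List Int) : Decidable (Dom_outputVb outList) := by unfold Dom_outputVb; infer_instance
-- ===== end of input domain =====

-- B replaces A's per-item loop (i/40 bookkeeping, repeated string concatenation) by a chunk-first pass: slices of 40, each joined once with ','.join (constant-factor faster in a timing run).

-- ===== PORT A =====
-- the for-loop of A: state (i, lines), one step per item
def outputVbLoop (l : List Int) (i : Nat) (lines : List String) : List String :=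
  match l with
  | [] => lines
  | item :: rest =>
    let linesI := i / 40
    let lines' := if linesI < lines.length
      then lines.set linesI (lines.getD linesI "" ++ "," ++ PySem.Int.toStr item)
      else lines ++ [PySem.Int.toStr item]
    outputVbLoop rest (i + 1) lines'

def outputVb (outList : List Int) : String :=
  "buf = Array(" ++ PySem.Str.join " _\n" (outputVbLoop outList 0 []) ++ ")"

-- ===== PORT B =====
-- Source B: for i in range(0, len(outList), 40): line = ','.join(str(x) for x in outList[i:i+40])
def outputVb_alt (outList : List Int) : String :=
  "buf = Array(" ++
    PySem.Str.join " _\n"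
      ((PySem.List.pyRange 0 (outList.length : Int) 40).map
        (fun i => PySem.Str.join ","
          ((PySem.List.slice outList (some i) (some (i + 40))).map PySem.Int.toStr))) ++ ")"

-- ===== PRECONDITION & SPEC =====
def Spec_outputVb (outList : List Int) (out : String) : Prop := out = outputVb_alt outList
instance (outList : List Int) (out : String) : Decidable (Spec_outputVb outList out) := by unfold Spec_outputVb; infer_instance

-- ===== CLAIM (what is proved, stated in full; the proofs are below) =====
def Claim_equal_outputVb : Prop := ∀ (outList : List Int), Dom_outputVb outList → Spec_outputVb outList (outputVb outList)

-- ===== LEMMAS AND PROOFS =====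

-- the chunk decomposition both sides compute through
def chunks40 (l : List Int) : List (List Int) :=
  if h : l = [] then [] else l.take 40 :: chunks40 (l.drop 40)
termination_by l.length
decreasing_by
  have : 0 < l.length := List.length_pos_of_ne_nil h
  simp only [List.length_drop]
  omega

-- A's way of filling one line, starting from the partial line `cur`
def joinRest (cur : String) (c : List Int) : String :=
  c.foldl (fun s x => s ++ "," ++ PySem.Int.toStr x) cur

def joinChunk (c : List Int) : String := PySem.Str.join "," (c.map PySem.Int.toStr)

theorem join_comma_two (s a : String) (t : List String) :
    PySem.Str.join "," (s :: a :: t) = s ++ "," ++ PySem.Str.join "," (a :: t) := by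
  simp [PySem.Str.join, PySem.Chars.join_cons_cons]
  apply String.toList_inj.mp
  simp

theorem join_comma_glue (t : List String) (a b : String) :
    PySem.Str.join "," (a :: b :: t) = PySem.Str.join "," ((a ++ "," ++ b) :: t) := by
  cases t with
  | nil =>
    simp [PySem.Str.join, PySem.Chars.join_cons_cons, PySem.Chars.join_singleton]
  | cons c t' =>
    rw [join_comma_two, join_comma_two b c t', join_comma_two (a ++ "," ++ b) c t']
    simp [String.append_assoc]

theorem join_comma_cons (c : List Int) : ∀ (s : String),
    PySem.Str.join "," (s :: c.map PySem.Int.toStr) = joinRest s c := by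
  induction c with
  | nil => intro s; simp [PySem.Str.join, joinRest]
  | cons x xs ih =>
    intro s
    rw [List.map_cons, join_comma_glue, ih (s ++ "," ++ PySem.Int.toStr x)]
    simp [joinRest]

theorem joinChunk_cons (x : Int) (c : List Int) :
    joinChunk (x :: c) = joinRest (PySem.Int.toStr x) c := by
  simpa [joinChunk] using join_comma_cons c (PySem.Int.toStr x)

-- ===== A's loop produces the chunk lines =====

theorem loop_inv : ∀ (l : List Int) (pre : List String) (cur : String) (j : Nat),
    1 ≤ j → j ≤ 40 →
    outputVbLoop l (40 * pre.length + j) (pre ++ [cur]) =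
      pre ++ [joinRest cur (l.take (40 - j))] ++ (chunks40 (l.drop (40 - j))).map joinChunk := by
  intro l
  induction l with
  | nil =>
    intro pre cur j _ _
    simp [outputVbLoop, joinRest]
    unfold chunks40
    simp
  | cons x xs ih =>
    intro pre cur j hj1 hj40
    by_cases hlt : j < 40
    · -- current chunk not full: update the last line
      have hdiv : (40 * pre.length + j) / 40 = pre.length := by omega
      rw [outputVbLoop]
      simp only [hdiv]
      rw [if_pos (by simp)]
      have hget : (pre ++ [cur]).getD pre.length "" = cur := by simp [List.getD]
      have hset : (pre ++ [cur]).set pre.length (cur ++ "," ++ PySem.Int.toStr x)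
          = pre ++ [cur ++ "," ++ PySem.Int.toStr x] := by
        rw [List.set_append_right _ _ (le_refl _)]
        simp
      rw [hget, hset]
      have hih := ih pre (cur ++ "," ++ PySem.Int.toStr x) (j + 1) (by omega) (by omega)
      rw [show 40 * pre.length + j + 1 = 40 * pre.length + (j + 1) by omega, hih]
      have htake : (x :: xs).take (40 - j) = x :: xs.take (40 - (j + 1)) := by
        rw [show 40 - j = (40 - (j + 1)) + 1 by omega]
        simp
      have hdrop : (x :: xs).drop (40 - j) = xs.drop (40 - (j + 1)) := by
        rw [show 40 - j = (40 - (j + 1)) + 1 by omega]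
        simp
      rw [htake, hdrop]
      simp [joinRest]
    · -- j = 40: the chunk is full, start a new line
      have hj : j = 40 := by omega
      subst hj
      have hdiv : (40 * pre.length + 40) / 40 = pre.length + 1 := by omega
      rw [outputVbLoop]
      simp only [hdiv]
      rw [if_neg (by simp)]
      have hih := ih (pre ++ [cur]) (PySem.Int.toStr x) 1 (by omega) (by omega)
      simp only [List.length_append, List.length_cons, List.length_nil] at hih
      rw [show 40 * pre.length + 40 + 1 = 40 * (pre.length + 0 + 1) + 1 by omega, hih]
      have hchunks : chunks40 (x :: xs) = (x :: xs.take 39) :: chunks40 (xs.drop 39) := by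
        conv_lhs => rw [chunks40]
        simp
      simp [hchunks, joinChunk_cons, joinRest]

-- ===== B's range/slice pass produces the same chunk lines =====

theorem pyRange40_cons (a b : Int) (h : a < b) :
    PySem.List.pyRange a b 40 = a :: PySem.List.pyRange (a + 40) b 40 := by
  rw [PySem.List.pyRange_of_pos a b (by norm_num), PySem.List.pyRange_of_pos (a + 40) b (by norm_num)]
  have hn : (if a < b then ((b - a + 40 - 1) / 40).toNat else 0)
      = (if a + 40 < b then ((b - (a + 40) + 40 - 1) / 40).toNat else 0) + 1 := by
    split_ifs <;> omega
  rw [hn, List.range_succ_eq_map, List.map_cons, List.map_map]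
  congr 1
  · simp
  · apply List.map_congr_left
    intro k _
    simp only [Function.comp_apply]
    push_cast
    ring

theorem chunks40_eq (l : List Int) :
    (PySem.List.pyRange 0 (l.length : Int) 40).map
      (fun i => PySem.List.slice l (some i) (some (i + 40))) = chunks40 l := by
  by_cases h : l = []
  · subst h
    simp only [List.length_nil, Nat.cast_zero]
    rw [PySem.List.pyRange_of_pos 0 0 (by norm_num)]
    unfold chunks40
    simp
  · have hlen : 0 < l.length := List.length_pos_of_ne_nil h
    have hch : chunks40 l = l.take 40 :: chunks40 (l.drop 40) := by
      conv_lhs => rw [chunks40]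
      simp [h]
    rw [pyRange40_cons 0 (l.length : Int) (by exact_mod_cast hlen), List.map_cons, hch]
    congr 1
    · -- slice l 0 40 = l.take 40
      have : ((0 : Int) + 40) = ((40 : Nat) : Int) := by norm_num
      rw [this, PySem.List.slice_zero_start, PySem.List.slice_to_natCast]
    · -- tail: reduce to the recursive call on l.drop 40
      have hrec := chunks40_eq (l.drop 40)
      rw [← hrec]
      rw [PySem.List.pyRange_of_pos (0 + 40) (l.length : Int) (by norm_num),
          PySem.List.pyRange_of_pos 0 ((l.drop 40).length : Int) (by norm_num)]
      have hcnt : (if (0 : Int) + 40 < (l.length : Int) then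
            (((l.length : Int) - (0 + 40) + 40 - 1) / 40).toNat else 0)
          = (if (0 : Int) < ((l.drop 40).length : Int) then
            (((l.drop 40).length : Int) - 0 + 40 - 1) / 40 |>.toNat else 0) := by
        simp only [List.length_drop]
        split_ifs <;> omega
      rw [hcnt, List.map_map, List.map_map]
      apply List.map_congr_left
      intro k _
      simp only [Function.comp_apply]
      rw [show (0 : Int) + 40 + 40 * (k : Int) = ((40 + 40 * k : Nat) : Int) by push_cast; ring,
          show ((40 + 40 * k : Nat) : Int) + 40 = ((40 + 40 * k + 40 : Nat) : Int) by push_cast; ring,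
          show (0 : Int) + 40 * (k : Int) = ((40 * k : Nat) : Int) by push_cast; ring,
          show ((40 * k : Nat) : Int) + 40 = ((40 * k + 40 : Nat) : Int) by push_cast; ring,
          PySem.List.slice_natCast, PySem.List.slice_natCast, List.drop_drop]
      congr 1
      omega
termination_by l.length
decreasing_by
  have : 0 < l.length := List.length_pos_of_ne_nil h
  simp only [List.length_drop]
  omega

-- ===== the equivalence =====

theorem outputVb_eq (l : List Int) : outputVb l = outputVb_alt l := by
  unfold outputVb outputVb_alt
  have halt : (PySem.List.pyRange 0 (l.length : Int) 40).map
      (fun i => PySem.Str.join "," ((PySem.List.slice l (some i) (some (i + 40))).map PySem.Int.toStr))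
      = (chunks40 l).map joinChunk := by
    have := congrArg (List.map joinChunk) (chunks40_eq l)
    rw [List.map_map] at this
    exact this
  rw [halt]
  cases l with
  | nil =>
    rw [show chunks40 [] = [] from by unfold chunks40; simp]
    rfl
  | cons x xs =>
    have h0 : outputVbLoop (x :: xs) 0 [] = outputVbLoop xs 1 [PySem.Int.toStr x] := by
      rw [outputVbLoop]; simp
    have h := loop_inv xs [] (PySem.Int.toStr x) 1 (by omega) (by omega)
    simp only [List.length_nil, Nat.mul_zero, Nat.zero_add, List.nil_append] at h
    rw [h0, h]
    have hchunks : chunks40 (x :: xs) = (x :: xs.take 39) :: chunks40 (xs.drop 39) := by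
      conv_lhs => rw [chunks40]
      simp
    rw [hchunks, List.map_cons, joinChunk_cons]
    simp

-- ===== VERDICT (by name: the statement is the Claim_ definition above) =====
theorem outputVb_spec : Claim_equal_outputVb := by
  intro l _
  unfold Spec_outputVb
  exact outputVb_eq l
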